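-- pv_equiv track=rewrite | github.com/viverbungag/Codewars | Consecutive Letters.py | solve
-- ===== SOURCE A (Python) =====
-- def solve(st):
--     st = list(map(str, st))
--     st.sort()
--     init = min(st)
--     num = ord(init)
--     count = 0
--     for x in range(num, num + len(st)):
--         if ord(st[count]) != x:
--             return False
--         count += 1
--     return True
-- ===== SOURCE B (Python) =====
-- def solve(st):
--     if len(set(st)) != len(st):
--         return False
--     o = [ord(c) for c in st]
--     return max(o) - min(o) == len(o) - 1
-- ===== Notes on version B (the rewrite author's own statement) =====
-- stated objective: faster
-- what changed: replaces sort-then-index-scan with a single pass: distinctness via a set and the closed-form test max(ord)-min(ord)==len-1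
import Mathlib
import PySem

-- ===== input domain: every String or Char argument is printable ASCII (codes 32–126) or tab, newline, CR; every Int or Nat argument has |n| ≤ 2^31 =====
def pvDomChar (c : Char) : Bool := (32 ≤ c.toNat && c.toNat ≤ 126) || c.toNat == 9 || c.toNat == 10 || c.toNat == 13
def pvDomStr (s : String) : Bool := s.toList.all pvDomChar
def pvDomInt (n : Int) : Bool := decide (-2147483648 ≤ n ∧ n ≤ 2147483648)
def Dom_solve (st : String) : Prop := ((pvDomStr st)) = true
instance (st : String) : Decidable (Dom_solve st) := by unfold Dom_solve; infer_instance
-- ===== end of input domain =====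

-- B replaces A's sort-then-scan with a single pass: distinctness via a set plus max(ord)-min(ord)==len-1.

-- ===== PORT A =====
-- the 'for x in range(num, num+len(st))' loop with the running index 'count'
def solveLoop (s : List Char) (count : Nat) (x : Int) : Nat → Bool
  | 0 => true
  | r + 1 =>
    match PySem.List.pyGet? s (count : Int) with
    | none => false  -- unreachable in A's use (count < len(s)); Python would raise IndexError
    | some c => if ((c.toNat : Int) ≠ x) then false else solveLoop s (count + 1) (x + 1) r

def solve (st : String) : Bool :=
  let l := st.toList
  let s := PySem.List.sorted l (fun c => c) false
  match PySem.List.min? s (fun c => c) with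
  | none => false  -- Python raises ValueError here (excluded by Pre_solve)
  | some init => solveLoop s 0 ((init.toNat : Int)) l.length

-- ===== PORT B =====
def solve_alt (st : String) : Bool :=
  let l := st.toList
  if (PySem.Set.ofList l).length ≠ l.length then false
  else
    let o := l.map (fun c => (c.toNat : Int))
    match PySem.List.max? o (fun x => x), PySem.List.min? o (fun x => x) with
    | some mx, some mn => decide (mx - mn = (o.length : Int) - 1)
    | _, _ => false  -- Python raises ValueError here (excluded by Pre_solve)

-- ===== PRECONDITION & SPEC =====
-- A raises ValueError (min of empty sequence) on the empty string, and so does B (max of empty list).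
def Pre_solve (st : String) : Prop := st ≠ ""
instance (st : String) : Decidable (Pre_solve st) := by unfold Pre_solve; infer_instance
def pvWitness_solve : String := "abc"

def Spec_solve (st : String) (out : Bool) : Prop := out = solve_alt st
instance (st : String) (out : Bool) : Decidable (Spec_solve st out) := by unfold Spec_solve; infer_instance

-- ===== CLAIM (what is proved, stated in full; the proofs are below) =====
def Claim_equal_solve : Prop := ∀ (st : String), Dom_solve st → Pre_solve st → Spec_solve st (solve st)

-- ===== LEMMAS AND PROOFS =====

theorem char_le_iff (a b : Char) : a ≤ b ↔ a.toNat ≤ b.toNat := by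
  rw [Char.le_def, UInt32.le_iff_toNat_le]; rfl

theorem char_lt_iff (a b : Char) : a < b ↔ a.toNat < b.toNat := by
  rw [Char.lt_def, UInt32.lt_iff_toNat_lt]; rfl

-- solveLoop = "every remaining position holds the expected consecutive code"
theorem solveLoop_iff (s : List Char) :
    ∀ (r count : Nat) (x : Int) (hle : count + r ≤ s.length),
      (solveLoop s count x r = true ↔
        ∀ k (hk : k < r), ((s[count + k]'(by omega)).toNat : Int) = x + k) := by
  intro r
  induction r with
  | zero => intro count x hle; simp [solveLoop]
  | succ r ih =>
    intro count x hle
    have hc : count < s.length := by omega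
    have hg : PySem.List.pyGet? s (count : Int) = some (s[count]'hc) := by
      simp [PySem.List.pyGet?_natCast, List.getElem?_eq_getElem hc]
    rw [solveLoop, hg]
    dsimp only
    by_cases hx : ((s[count]'hc).toNat : Int) = x
    · rw [if_neg (by simp [hx]), ih (count + 1) (x + 1) (by omega)]
      constructor
      · intro h k hk
        match k with
        | 0 => simpa using hx
        | k + 1 =>
          have h2 := h k (by omega)
          have hidx : count + 1 + k = count + (k + 1) := by omega
          rw [show ((s[count + (k + 1)]'(by omega)) = (s[count + 1 + k]'(by omega))) from by
            congr 1; omega, h2]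
          push_cast; ring
      · intro h k hk
        have h2 := h (k + 1) (by omega)
        have hidx : count + 1 + k = count + (k + 1) := by omega
        rw [show ((s[count + 1 + k]'(by omega)) = (s[count + (k + 1)]'(by omega))) from by
          congr 1, h2]
        push_cast; ring
    · rw [if_pos (by simp [hx])]
      constructor
      · intro h; exact absurd h (by simp)
      · intro h; exact absurd (by simpa using h 0 (by omega)) hx

-- strictly increasing chars: codes grow at least by the index gap
theorem pairwise_gap (s : List Char) (hp : s.Pairwise (· < ·)) :
    ∀ (i d : Nat) (h : i + d < s.length), (s[i]'(by omega)).toNat + d ≤ (s[i + d]'h).toNat := by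
  intro i d
  induction d with
  | zero => intro h; simp
  | succ d ih =>
    intro h
    have h1 := ih (by omega)
    have h2 : s[i + d]'(by omega) < s[i + (d + 1)]'h := by
      have := List.pairwise_iff_getElem.mp hp (i + d) (i + (d + 1)) (by omega) h (by omega)
      exact this
    have := (char_lt_iff _ _).mp h2
    omega

-- set-size check = Nodup
theorem ofList_length_eq_iff {α : Type} [DecidableEq α] (l : List α) :
    (PySem.Set.ofList l).length = l.length ↔ l.Nodup := by
  constructor
  · intro h
    have hfin : (PySem.Set.ofList l).toFinset = l.toFinset := by
      ext x; simp [List.mem_toFinset, PySem.Set.mem_ofList]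
    have hnd := PySem.Set.nodup_ofList (xs := l)
    have hcard : l.toFinset.card = l.length := by
      rw [← hfin, List.toFinset_card_of_nodup hnd, h]
    rw [List.card_toFinset] at hcard
    have hsub : l.dedup.Sublist l := List.dedup_sublist l
    have : l.dedup = l := hsub.eq_of_length hcard
    rw [← this]; exact List.nodup_dedup l
  · intro h; rw [PySem.Set.ofList_eq_self_of_nodup l h]

theorem sorted_getElem_mono (s : List Char) (hpw : s.Pairwise (· ≤ ·))
    (i j : Nat) (hij : i ≤ j) (hj : j < s.length) : s[i]'(by omega) ≤ s[j]'hj := by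
  rcases Nat.lt_or_ge i j with hlt | hge
  · exact List.pairwise_iff_getElem.mp hpw i j (by omega) hj hlt
  · have : i = j := by omega
    subst this; exact le_refl _

theorem solve_eq (st : String) (h : st ≠ "") : solve st = solve_alt st := by
  have hl : st.toList ≠ [] := fun hnil => h (String.toList_eq_nil_iff.mp hnil)
  rw [Bool.eq_iff_iff]
  unfold solve solve_alt
  dsimp only
  set l := st.toList with hldef
  set s := PySem.List.sorted l (fun c => c) false with hsdef
  set o := l.map (fun c => (c.toNat : Int)) with hodef
  have hperm : s.Perm l := PySem.List.sorted_perm ..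
  have hslen : s.length = l.length := hperm.length_eq
  have hn0 : 0 < l.length := List.length_pos_iff.mpr hl
  have hsne : s ≠ [] := by
    intro h0; rw [h0] at hslen; simp at hslen; omega
  have hone : o ≠ [] := by simp [hodef, hl]
  obtain ⟨init, hinit⟩ : ∃ i, PySem.List.min? s (fun c => c) = some i := by
    cases hm : PySem.List.min? s (fun c => c) with
    | none => exact absurd ((PySem.List.min?_eq_none_iff ..).mp hm) hsne
    | some i => exact ⟨i, rfl⟩
  obtain ⟨mx, hmx⟩ : ∃ v, PySem.List.max? o (fun x => x) = some v := by
    cases hm : PySem.List.max? o (fun x => x) with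
    | none => exact absurd ((PySem.List.max?_eq_none_iff ..).mp hm) hone
    | some v => exact ⟨v, rfl⟩
  obtain ⟨mn, hmn⟩ : ∃ v, PySem.List.min? o (fun x => x) = some v := by
    cases hm : PySem.List.min? o (fun x => x) with
    | none => exact absurd ((PySem.List.min?_eq_none_iff ..).mp hm) hone
    | some v => exact ⟨v, rfl⟩
  rw [hinit, hmx, hmn]
  rw [solveLoop_iff s l.length 0 ((init.toNat : Int)) (by omega)]
  simp only [Nat.zero_add]
  -- shared facts about init, mn, mx
  have hpw : s.Pairwise (· ≤ ·) := PySem.List.sorted_pairwise ..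
  have hmemsl : ∀ c : Char, c ∈ s ↔ c ∈ l := fun c => PySem.List.mem_sorted ..
  have hinit_mem : init ∈ s := PySem.List.min?_mem hinit
  have hinit_min : ∀ y ∈ s, init ≤ y := PySem.List.min?_isMin hinit
  have hmn_mem : mn ∈ o := PySem.List.min?_mem hmn
  have hmn_min : ∀ y ∈ o, mn ≤ y := PySem.List.min?_isMin hmn
  have hmx_mem : mx ∈ o := PySem.List.max?_mem hmx
  have hmx_max : ∀ y ∈ o, y ≤ mx := PySem.List.max?_isMax hmx
  have h0lt : 0 < s.length := by omega
  have hm0 : (s[0]'h0lt).toNat = init.toNat := by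
    obtain ⟨j, hj, hje⟩ := List.mem_iff_getElem.mp hinit_mem
    have h1 : init ≤ s[0]'h0lt := hinit_min _ (List.getElem_mem h0lt)
    have h2 : s[0]'h0lt ≤ init := by
      rw [← hje]; exact sorted_getElem_mono s hpw 0 j (by omega) hj
    exact congrArg Char.toNat (le_antisymm h2 h1)
  have hmn_eq : mn = (init.toNat : Int) := by
    have h1 : mn ≤ (init.toNat : Int) :=
      hmn_min _ (List.mem_map_of_mem ((hmemsl init).mp hinit_mem))
    obtain ⟨c, hc, hce⟩ := List.mem_map.mp hmn_mem
    have h2 : init ≤ c := hinit_min _ ((hmemsl c).mpr hc)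
    have := (char_le_iff _ _).mp h2
    omega
  have hmx_eq : mx = (((s[l.length - 1]'(by omega)).toNat : Int)) := by
    have h1 : mx ≤ ((s[l.length - 1]'(by omega)).toNat : Int) := by
      obtain ⟨c, hc, hce⟩ := List.mem_map.mp hmx_mem
      obtain ⟨j, hj, hje⟩ := List.mem_iff_getElem.mp ((hmemsl c).mpr hc)
      have h2 : c ≤ s[l.length - 1]'(by omega) := by
        rw [← hje]; exact sorted_getElem_mono s hpw j (l.length - 1) (by omega) (by omega)
      have := (char_le_iff _ _).mp h2
      omega
    have h2 : ((s[l.length - 1]'(by omega)).toNat : Int) ≤ mx :=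
      hmx_max _ (List.mem_map_of_mem ((hmemsl _).mp (List.getElem_mem (by omega))))
    omega
  have holen : o.length = l.length := by simp [hodef]
  constructor
  · -- A true → B true
    intro hA
    have hsnd : s.Nodup := by
      refine List.pairwise_iff_getElem.mpr ?_
      intro i j hi hj hij heq
      have h1 := hA i (by omega)
      have h2 := hA j (by omega)
      rw [heq] at h1
      omega
    have hnd : l.Nodup := hperm.nodup_iff.mp hsnd
    rw [if_neg (by simp [(ofList_length_eq_iff l).mpr hnd])]
    have h2 := hA (l.length - 1) (by omega)
    simp only [decide_eq_true_eq]
    omega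
  · -- B true → A true
    intro hB
    by_cases hcond : (PySem.Set.ofList l).length ≠ l.length
    · rw [if_pos hcond] at hB; exact absurd hB (by simp)
    · rw [if_neg hcond] at hB
      have hnd : l.Nodup := (ofList_length_eq_iff l).mp (by omega)
      have heq : mx - mn = (o.length : Int) - 1 := by simpa using hB
      have hsnd : s.Nodup := hperm.nodup_iff.mpr hnd
      have hplt : s.Pairwise (· < ·) := by
        refine List.pairwise_iff_getElem.mpr ?_
        intro i j hi hj hij
        refine lt_of_le_of_ne (List.pairwise_iff_getElem.mp hpw i j hi hj hij) ?_
        intro hcontra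
        exact absurd ((List.Nodup.getElem_inj_iff hsnd).mp hcontra) (by omega)
      intro k hk
      have hlow := pairwise_gap s hplt 0 k (by omega)
      simp only [Nat.zero_add] at hlow
      have hup := pairwise_gap s hplt k (l.length - 1 - k) (by omega)
      have hidx : k + (l.length - 1 - k) = l.length - 1 := by omega
      rw [show (s[k + (l.length - 1 - k)]'(by omega) = s[l.length - 1]'(by omega)) from by
        congr 1] at hup
      omega

-- ===== VERDICT (by name: the statement is the Claim_ definition above) =====
theorem solve_spec : Claim_equal_solve := by
  intro st _ hpre
  unfold Spec_solve
  exact solve_eq st hpre
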